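-- pv_equiv track=rewrite | github.com/krinalsuthar/code-translator | app.py | c_to_java
-- ===== SOURCE A (Python) =====
-- def c_to_java(c_code):
--     """Translate C code to Java."""
--     replacements = {
--         "printf(": "System.out.println(",  # Print statements
--         "int main()": "public static void main(String[] args)",  # Main function
--         "char*": "String",  # Strings
--     }
--
--     java_code = []
--     for line in c_code.splitlines():
--         for c, java in replacements.items():
--             line = line.replace(c, java)
--         java_code.append(line.strip())
--
--     return "\n".join(java_code)
-- ===== SOURCE B (Python) =====
-- def c_to_java(c_code):
--     """Translate C code to Java (single left-to-right multi-pattern scan per line)."""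
--     pats = [
--         ("printf(", "System.out.println("),
--         ("int main()", "public static void main(String[] args)"),
--         ("char*", "String"),
--     ]
--     out_lines = []
--     for line in c_code.splitlines():
--         res = []
--         i = 0
--         n = len(line)
--         while i < n:
--             for p, r in pats:
--                 if line.startswith(p, i):
--                     res.append(r)
--                     i += len(p)
--                     break
--             else:
--                 res.append(line[i])
--                 i += 1
--         out_lines.append("".join(res).strip())
--     return "\n".join(out_lines)
-- ===== Notes on version B (the rewrite author's own statement) =====
-- stated objective: alternative
-- what changed: A runs three sequential full-string str.replace passes over each line (one per pattern); B makes a single left-to-right scan per line that tries the three patterns at each position and copies a character otherwise, so each line is traversed once.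
import Mathlib
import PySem

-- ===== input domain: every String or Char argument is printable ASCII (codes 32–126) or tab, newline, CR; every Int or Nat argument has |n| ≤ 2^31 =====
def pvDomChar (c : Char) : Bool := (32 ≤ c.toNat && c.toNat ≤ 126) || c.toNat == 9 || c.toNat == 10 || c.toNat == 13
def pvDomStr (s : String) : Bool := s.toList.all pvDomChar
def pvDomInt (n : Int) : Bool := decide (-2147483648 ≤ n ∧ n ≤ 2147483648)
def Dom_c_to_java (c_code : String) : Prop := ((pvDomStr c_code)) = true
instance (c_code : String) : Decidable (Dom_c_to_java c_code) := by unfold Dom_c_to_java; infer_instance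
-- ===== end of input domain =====

-- B replaces A's three cascaded full-string str.replace passes per line with one left-to-right
-- multi-pattern scan per line (objective: alternative — a single traversal instead of three).

-- ===== PORT A =====
def c_to_java (c_code : String) : String :=
  let replacements : List (String × String) :=
    [("printf(", "System.out.println("),
     ("int main()", "public static void main(String[] args)"),
     ("char*", "String")]
  let java_code : List String :=
    (PySem.Str.splitlines c_code).foldl
      (fun acc line =>
        acc ++ [PySem.Str.strip (replacements.foldl (fun l pr => PySem.Str.replace l pr.1 pr.2) line)])
      []
  PySem.Str.join "\n" java_code

-- ===== PORT B =====
-- the inner while-loop of Source B: at each position try the three patterns in order, else copy one char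
def pvScan : List Char → List Char
  | [] => []
  | c :: t =>
    if ("printf(".toList).isPrefixOf (c :: t) then
      "System.out.println(".toList ++ pvScan ((c :: t).drop 7)
    else if ("int main()".toList).isPrefixOf (c :: t) then
      "public static void main(String[] args)".toList ++ pvScan ((c :: t).drop 10)
    else if ("char*".toList).isPrefixOf (c :: t) then
      "String".toList ++ pvScan ((c :: t).drop 5)
    else
      c :: pvScan t
termination_by l => l.length
decreasing_by all_goals (simp [List.length_drop]; try omega)

def c_to_java_alt (c_code : String) : String :=
  let out_lines : List String :=
    (PySem.Str.splitlines c_code).foldl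
      (fun acc line => acc ++ [PySem.Str.strip (String.ofList (pvScan line.toList))]) []
  PySem.Str.join "\n" out_lines

-- ===== PRECONDITION & SPEC =====
def Spec_c_to_java (c_code : String) (out : String) : Prop := out = c_to_java_alt c_code
instance (c_code : String) (out : String) : Decidable (Spec_c_to_java c_code out) := by unfold Spec_c_to_java; infer_instance

-- ===== CLAIM (what is proved, stated in full; the proofs are below) =====
def Claim_equal_c_to_java : Prop := ∀ (c_code : String), Dom_c_to_java c_code → Spec_c_to_java c_code (c_to_java c_code)

-- ===== LEMMAS AND PROOFS =====

theorem go_acc (old new : List Char) : ∀ (fuel : Nat) (l acc : List Char),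
    PySem.Chars.replace.go old new fuel l acc = acc.reverse ++ PySem.Chars.replace.go old new fuel l [] := by
  intro fuel
  induction fuel with
  | zero => intro l acc; simp [PySem.Chars.replace.go]
  | succ f ih =>
    intro l acc
    cases l with
    | nil => simp [PySem.Chars.replace.go]
    | cons c t =>
      simp only [PySem.Chars.replace.go]
      split
      · rw [ih _ (new.reverse ++ acc), ih _ (new.reverse ++ [])]
        simp
      · rw [ih t (c :: acc), ih t [c]]
        simp

theorem go_fuel (old new : List Char) (hold : old ≠ []) : ∀ (fuel fuel' : Nat) (l : List Char),
    l.length ≤ fuel → l.length ≤ fuel' →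
    PySem.Chars.replace.go old new fuel l [] = PySem.Chars.replace.go old new fuel' l [] := by
  intro fuel
  induction fuel with
  | zero =>
    intro fuel' l h h'
    have : l = [] := by cases l <;> simp_all
    subst this
    cases fuel' <;> simp [PySem.Chars.replace.go]
  | succ f ih =>
    intro fuel' l h h'
    cases l with
    | nil => cases fuel' <;> simp [PySem.Chars.replace.go]
    | cons c t =>
      cases fuel' with
      | zero => simp at h'
      | succ f' =>
        simp only [PySem.Chars.replace.go]
        split
        · rw [go_acc, go_acc old new f']
          have hlen : (List.drop old.length (c :: t)).length ≤ f ∧ (List.drop old.length (c :: t)).length ≤ f' := by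
            have : 1 ≤ old.length := by cases old <;> simp_all
            simp only [List.length_drop, List.length_cons] at *
            omega
          rw [ih f' _ hlen.1 hlen.2]
        · rw [go_acc old new f, go_acc old new f']
          have hlen : t.length ≤ f ∧ t.length ≤ f' := by simp at h h'; omega
          rw [ih f' t hlen.1 hlen.2]

theorem replace_nil (old new : List Char) (hold : old ≠ []) :
    PySem.Chars.replace [] old new = [] := by
  simp [PySem.Chars.replace, PySem.Chars.replace.go, List.isEmpty_iff, hold]

theorem replace_neg (old new : List Char) (c : Char) (t : List Char)
    (h : ¬ old.isPrefixOf (c :: t) = true) :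
    PySem.Chars.replace (c :: t) old new = c :: PySem.Chars.replace t old new := by
  have hold : old ≠ [] := by
    rintro rfl; simp at h
  simp only [PySem.Chars.replace, List.isEmpty_iff, hold, List.length_cons, if_false,
    PySem.Chars.replace.go]
  rw [if_neg h, go_acc]
  simp

theorem replace_pos (old new l : List Char) (hold : old ≠ []) (h : old.isPrefixOf l = true) :
    PySem.Chars.replace l old new = new ++ PySem.Chars.replace (l.drop old.length) old new := by
  cases l with
  | nil =>
    have : old = [] := by simpa using (List.isPrefixOf_iff_prefix.mp h)
    exact absurd this hold
  | cons c t =>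
    simp only [PySem.Chars.replace, List.isEmpty_iff, hold, List.length_cons, if_false,
      PySem.Chars.replace.go]
    rw [if_pos h, go_acc]
    simp only [List.append_nil, List.reverse_reverse]
    congr 1
    have h1 : 1 ≤ old.length := by cases old <;> simp_all
    apply go_fuel old new hold
    · simp only [List.length_drop, List.length_cons]; omega
    · exact le_refl _

def pvShieldB (p x : List Char) : Bool :=
  (List.range x.length).all fun i => !(x.drop i).isPrefixOf p && !p.isPrefixOf (x.drop i)

def pvShield (p x : List Char) : Prop :=
  ∀ i, i < x.length → ¬ (x.drop i).isPrefixOf p = true ∧ ¬ p.isPrefixOf (x.drop i) = true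

theorem pvShield_of_B (p x : List Char) (h : pvShieldB p x = true) : pvShield p x := by
  intro i hi
  have := List.all_eq_true.mp h i (List.mem_range.mpr hi)
  simp only [Bool.and_eq_true, Bool.not_eq_true'] at this
  exact ⟨by simp [this.1], by simp [this.2]⟩

theorem not_prefix_append (p x y : List Char) (hx : x ≠ []) (h : pvShield p x) :
    ¬ p.isPrefixOf (x ++ y) = true := by
  intro hp
  have hp' : p <+: x ++ y := List.isPrefixOf_iff_prefix.mp hp
  have hx' : x <+: x ++ y := List.prefix_append x y
  have h0 := h 0 (by cases x <;> simp_all)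
  rcases List.prefix_or_prefix_of_prefix hp' hx' with hc | hc
  · exact h0.2 (by simpa using List.isPrefixOf_iff_prefix.mpr hc)
  · exact h0.1 (by simpa using List.isPrefixOf_iff_prefix.mpr hc)

theorem shield_append (p r : List Char) :
    ∀ (x : List Char), pvShield p x → ∀ y, PySem.Chars.replace (x ++ y) p r = x ++ PySem.Chars.replace y p r := by
  intro x
  induction x with
  | nil => intro _ y; simp
  | cons a t ih =>
    intro h y
    have hnp : ¬ p.isPrefixOf ((a :: t) ++ y) = true := not_prefix_append p (a :: t) y (by simp) h
    rw [List.cons_append, replace_neg p r a (t ++ y) (by simpa using hnp)]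
    rw [ih (fun i hi => by simpa using h (i+1) (by simpa using Nat.succ_lt_succ hi)) y]
    simp

theorem transfer (p r q : List Char) (hp : p ≠ []) (hmix : pvShield r q) :
    ∀ (n : Nat) (l : List Char), l.length ≤ n → ∀ j, j < q.length →
      ¬ (q.drop j).isPrefixOf l = true → ¬ (q.drop j).isPrefixOf (PySem.Chars.replace l p r) = true := by
  intro n
  induction n with
  | zero =>
    intro l hl j hj hq
    have : l = [] := by cases l <;> simp_all
    subst this
    rw [replace_nil p r hp]
    exact hq
  | succ m ih =>
    intro l hl j hj hq
    by_cases hpre : p.isPrefixOf l = true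
    · rw [replace_pos p r l hp hpre]
      intro hcon
      have hc' : q.drop j <+: r ++ PySem.Chars.replace (l.drop p.length) p r :=
        List.isPrefixOf_iff_prefix.mp hcon
      have hr : r <+: r ++ PySem.Chars.replace (l.drop p.length) p r := List.prefix_append _ _
      have hm := hmix j hj
      rcases List.prefix_or_prefix_of_prefix hc' hr with hc | hc
      · exact hm.1 (List.isPrefixOf_iff_prefix.mpr hc)
      · exact hm.2 (List.isPrefixOf_iff_prefix.mpr hc)
    · cases l with
      | nil =>
        rw [replace_nil p r hp]; exact hq
      | cons c t =>
        rw [replace_neg p r c t hpre]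
        have hdq : q.drop j = q[j] :: q.drop (j+1) := List.drop_eq_getElem_cons hj
        intro hcon
        rw [hdq] at hcon hq
        simp only [List.isPrefixOf_cons₂] at hcon
        -- hcon : q[j] == c && (q.drop (j+1)).isPrefixOf (replace t)
        have hqc : q[j] = c := by
          by_cases h' : q[j] = c
          · exact h'
          · simp [h'] at hcon
        subst hqc
        simp only [BEq.rfl, Bool.true_and] at hcon
        by_cases hj1 : j + 1 < q.length
        · have hqt : ¬ (q.drop (j+1)).isPrefixOf t = true := by
            intro h'
            apply hq
            simp [List.isPrefixOf, h']
          exact ih t (by simp at hl; omega) (j+1) hj1 hqt hcon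
        · have : q.drop (j+1) = [] := by
            apply List.drop_eq_nil_of_le; omega
          rw [this] at hq
          apply hq
          simp [List.isPrefixOf]

theorem scan_eq : ∀ (n : Nat) (l : List Char), l.length ≤ n →
    PySem.Chars.replace (PySem.Chars.replace (PySem.Chars.replace l
        "printf(".toList "System.out.println(".toList)
        "int main()".toList "public static void main(String[] args)".toList)
        "char*".toList "String".toList
      = pvScan l := by
  have hP1 : ("printf(".toList) ≠ [] := by decide
  have hP2 : ("int main()".toList) ≠ [] := by decide
  have hP3 : ("char*".toList) ≠ [] := by decide
  have s21 : pvShield ("int main()".toList) ("System.out.println(".toList) := pvShield_of_B _ _ (by decide)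
  have s31 : pvShield ("char*".toList) ("System.out.println(".toList) := pvShield_of_B _ _ (by decide)
  have s32 : pvShield ("char*".toList) ("public static void main(String[] args)".toList) := pvShield_of_B _ _ (by decide)
  have s12 : pvShield ("printf(".toList) ("int main()".toList) := pvShield_of_B _ _ (by decide)
  have s13 : pvShield ("printf(".toList) ("char*".toList) := pvShield_of_B _ _ (by decide)
  have s23 : pvShield ("int main()".toList) ("char*".toList) := pvShield_of_B _ _ (by decide)
  have m21 : pvShield ("System.out.println(".toList) ("int main()".toList) := pvShield_of_B _ _ (by decide)
  have m31 : pvShield ("System.out.println(".toList) ("char*".toList) := pvShield_of_B _ _ (by decide)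
  have m32 : pvShield ("public static void main(String[] args)".toList) ("char*".toList) := pvShield_of_B _ _ (by decide)
  intro n
  induction n with
  | zero =>
    intro l hl
    have : l = [] := by cases l <;> simp_all
    subst this
    rw [replace_nil _ _ hP1, replace_nil _ _ hP2, replace_nil _ _ hP3, pvScan]
  | succ m ih =>
    intro l hl
    cases l with
    | nil =>
      rw [replace_nil _ _ hP1, replace_nil _ _ hP2, replace_nil _ _ hP3, pvScan]
    | cons c t =>
      by_cases h1 : ("printf(".toList).isPrefixOf (c :: t) = true
      · rw [replace_pos _ _ _ hP1 h1]
        simp only [show ("printf(".toList).length = 7 from rfl]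
        rw [shield_append _ _ _ s21, shield_append _ _ _ s31]
        rw [pvScan, if_pos h1]
        congr 1
        exact ih _ (by simp only [List.length_drop, List.length_cons] at *; omega)
      · by_cases h2 : ("int main()".toList).isPrefixOf (c :: t) = true
        · have hld : (c :: t) = "int main()".toList ++ (c :: t).drop 10 := by
            have h' := List.prefix_iff_eq_append.mp (List.isPrefixOf_iff_prefix.mp h2)
            simpa only [show ("int main()".toList).length = 10 from rfl] using h'.symm
          conv_lhs => rw [hld]
          rw [shield_append _ _ _ s12]
          rw [replace_pos _ _ _ hP2 (List.isPrefixOf_iff_prefix.mpr (List.prefix_append _ _))]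
          simp only [show ("int main()".toList).length = 10 from rfl, List.drop_left']
          rw [shield_append _ _ _ s32]
          rw [pvScan, if_neg h1, if_pos h2]
          congr 1
          exact ih _ (by simp only [List.length_drop, List.length_cons] at *; omega)
        · by_cases h3 : ("char*".toList).isPrefixOf (c :: t) = true
          · have hld : (c :: t) = "char*".toList ++ (c :: t).drop 5 := by
              have h' := List.prefix_iff_eq_append.mp (List.isPrefixOf_iff_prefix.mp h3)
              simpa only [show ("char*".toList).length = 5 from rfl] using h'.symm
            conv_lhs => rw [hld]
            rw [shield_append _ _ _ s13, shield_append _ _ _ s23]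
            rw [replace_pos _ _ _ hP3 (List.isPrefixOf_iff_prefix.mpr (List.prefix_append _ _))]
            simp only [show ("char*".toList).length = 5 from rfl, List.drop_left']
            rw [pvScan, if_neg h1, if_neg h2, if_pos h3]
            congr 1
            exact ih _ (by simp only [List.length_drop, List.length_cons] at *; omega)
          · have E1 := replace_neg "printf(".toList "System.out.println(".toList c t h1
            have hq2 : ¬ ("int main()".toList).isPrefixOf
                (PySem.Chars.replace (c :: t) "printf(".toList "System.out.println(".toList) = true := by
              have := transfer _ _ _ hP1 m21 (c :: t).length (c :: t) le_rfl 0 (by decide) (by simpa using h2)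
              simpa using this
            rw [E1] at hq2
            have E2 := replace_neg "int main()".toList "public static void main(String[] args)".toList c _ hq2
            have hq3 : ¬ ("char*".toList).isPrefixOf
                (PySem.Chars.replace (PySem.Chars.replace (c :: t) "printf(".toList "System.out.println(".toList)
                  "int main()".toList "public static void main(String[] args)".toList) = true := by
              have step1 := transfer _ _ _ hP1 m31 (c :: t).length (c :: t) le_rfl 0 (by decide) (by simpa using h3)
              have step2 := transfer _ _ _ hP2 m32 _ _ le_rfl 0 (by decide) (by simpa using step1)
              simpa using step2
            rw [E1, E2] at hq3
            have E3 := replace_neg "char*".toList "String".toList c _ hq3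
            rw [E1, E2, E3]
            rw [pvScan, if_neg h1, if_neg h2, if_neg h3]
            congr 1
            exact ih t (by simp only [List.length_cons] at hl; omega)

theorem line_eq (line : String) :
    PySem.Str.strip (PySem.Str.replace (PySem.Str.replace (PySem.Str.replace line
        "printf(" "System.out.println(") "int main()" "public static void main(String[] args)") "char*" "String")
      = PySem.Str.strip (String.ofList (pvScan line.toList)) := by
  simp only [PySem.Str.strip, PySem.Str.replace, String.toList_ofList]
  rw [scan_eq line.toList.length line.toList le_rfl]

theorem c_to_java_eq (c : String) : c_to_java c = c_to_java_alt c := by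
  simp only [c_to_java, c_to_java_alt]
  rw [PySem.List.foldl_append_singleton_eq_map, PySem.List.foldl_append_singleton_eq_map]
  apply congrArg
  apply List.map_congr_left
  intro line _
  simp only [List.foldl_cons, List.foldl_nil]
  exact line_eq line

-- ===== VERDICT (by name: the statement is the Claim_ definition above) =====
theorem c_to_java_spec : Claim_equal_c_to_java := by
  intro c _
  unfold Spec_c_to_java
  exact c_to_java_eq c
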